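-- pv_equiv track=rewrite | github.com/Bharat745-delricht/Delricht_chatbot | api/routes/protocol_comparison.py | calculate_restrictiveness_score
-- ===== SOURCE A (Python) =====
-- def calculate_restrictiveness_score(criterion_text: str, criterion_type: str) -> int:
--     """
--     Calculate restrictiveness score for a single criterion (0-100)
--     Higher score = more restrictive = harder to recruit
--     """
--     score = 50  # Base score
--
--     text = criterion_text.lower()
--
--     # Inclusion criteria - look for limiting factors
--     if criterion_type == 'inclusion':
--         # Age restrictions
--         if 'age' in text:
--             if '>= 65' in text or '> 65' in text or '65+' in text:
--                 score += 15  # Elderly only is restrictive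
--             elif '<= 21' in text or '< 21' in text:
--                 score += 10  # Young adults only
--             elif '18-65' in text or '18 to 65' in text:
--                 score += 5  # Standard adult range
--
--         # BMI restrictions
--         if 'bmi' in text:
--             if '>= 30' in text or '> 30' in text:
--                 score += 10  # Obesity requirement
--             elif '<= 25' in text or '< 25' in text:
--                 score += 10  # Normal weight requirement
--             elif 'bmi' in text:
--                 score += 5  # Any BMI restriction
--
--         # Disease severity
--         if any(word in text for word in ['severe', 'moderate to severe', 'active disease']):
--             score += 15
--         elif 'moderate' in text:
--             score += 10
--         elif 'mild' in text:
--             score += 5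
--
--         # Lab values - specific ranges are restrictive
--         if any(word in text for word in ['hba1c', 'hemoglobin', 'egfr', 'alt', 'ast']):
--             score += 10
--
--         # Documented diagnosis requirement
--         if any(word in text for word in ['diagnosed', 'documented', 'confirmed']):
--             score += 5
--
--     # Exclusion criteria - each one makes recruitment harder
--     elif criterion_type == 'exclusion':
--         score += 5  # Base exclusion penalty
--
--         # Common comorbidities
--         if any(word in text for word in ['diabetes', 'hypertension', 'cardiovascular', 'cancer']):
--             score += 15
--
--         # Medications
--         if any(word in text for word in ['medication', 'drug', 'treatment', 'therapy']):
--             score += 10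
--
--         # Pregnancy/reproductive
--         if any(word in text for word in ['pregnant', 'pregnancy', 'breastfeeding', 'childbearing']):
--             score += 5
--
--         # Substance use
--         if any(word in text for word in ['alcohol', 'drug abuse', 'smoking']):
--             score += 5
--
--     return max(0, min(100, score))  # Clamp between 0 and 100
-- ===== SOURCE B (Python) =====
-- # B: data-driven scoring — an ordered rules table (base score + guarded groups of
-- # (keyword, points) rules, first match per group wins) replaces A's if/elif chains.
--
-- RULES = {
--     'inclusion': (50, [
--         ('age', [('>= 65', 15), ('> 65', 15), ('65+', 15),
--                  ('<= 21', 10), ('< 21', 10),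
--                  ('18-65', 5), ('18 to 65', 5)]),
--         ('bmi', [('>= 30', 10), ('> 30', 10),
--                  ('<= 25', 10), ('< 25', 10),
--                  ('bmi', 5)]),
--         ('', [('severe', 15), ('moderate to severe', 15), ('active disease', 15),
--               ('moderate', 10), ('mild', 5)]),
--         ('', [('hba1c', 10), ('hemoglobin', 10), ('egfr', 10), ('alt', 10), ('ast', 10)]),
--         ('', [('diagnosed', 5), ('documented', 5), ('confirmed', 5)]),
--     ]),
--     'exclusion': (55, [
--         ('', [('diabetes', 15), ('hypertension', 15), ('cardiovascular', 15), ('cancer', 15)]),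
--         ('', [('medication', 10), ('drug', 10), ('treatment', 10), ('therapy', 10)]),
--         ('', [('pregnant', 5), ('pregnancy', 5), ('breastfeeding', 5), ('childbearing', 5)]),
--         ('', [('alcohol', 5), ('drug abuse', 5), ('smoking', 5)]),
--     ]),
-- }
--
--
-- def _group_points(text, guard, rules):
--     if guard not in text:
--         return 0
--     for kw, pts in rules:
--         if kw in text:
--             return pts
--     return 0
--
--
-- def calculate_restrictiveness_score(criterion_text: str, criterion_type: str) -> int:
--     text = criterion_text.lower()
--     base, groups = RULES.get(criterion_type, (50, []))
--     score = base + sum(_group_points(text, guard, rules) for guard, rules in groups)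
--     return max(0, min(100, score))
-- ===== Notes on version B (the rewrite author's own statement) =====
-- stated objective: simpler
-- what changed: Replaces A's hand-written if/elif chains by a single ordered rules table (base score per criterion_type plus guarded groups of (keyword, points) rules, first matching rule per group wins) evaluated by one generic loop.
import Mathlib
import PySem

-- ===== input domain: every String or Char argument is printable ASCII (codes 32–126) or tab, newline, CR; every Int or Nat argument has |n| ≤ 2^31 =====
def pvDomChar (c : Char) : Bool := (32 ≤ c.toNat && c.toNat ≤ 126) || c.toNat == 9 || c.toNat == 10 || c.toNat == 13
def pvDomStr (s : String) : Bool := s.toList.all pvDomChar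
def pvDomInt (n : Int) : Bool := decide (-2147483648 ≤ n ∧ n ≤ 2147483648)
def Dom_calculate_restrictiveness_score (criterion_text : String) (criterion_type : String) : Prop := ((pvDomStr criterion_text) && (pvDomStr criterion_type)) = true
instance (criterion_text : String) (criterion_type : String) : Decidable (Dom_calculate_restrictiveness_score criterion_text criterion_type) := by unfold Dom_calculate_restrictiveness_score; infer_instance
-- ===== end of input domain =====

-- B replaces A's hand-written if/elif chains by one ordered rules table (base score +
-- guarded groups of (keyword, points) rules, first matching rule per group wins): simpler.

-- ===== PORT A =====
-- Python 'w in text' on lowered text ported as PySem.Chars.isIn on the char list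
-- (exact: PySem.Str ops are defined over Chars, toList_lower bridge).
def calculate_restrictiveness_score (criterion_text : String) (criterion_type : String) : Int :=
  let score : Int := 50
  let text : List Char := PySem.Chars.lower criterion_text.toList
  let score :=
    if criterion_type == "inclusion" then
      -- Age restrictions
      let score :=
        if PySem.Chars.isIn "age".toList text then
          if PySem.Chars.isIn ">= 65".toList text || PySem.Chars.isIn "> 65".toList text || PySem.Chars.isIn "65+".toList text then score + 15
          else if PySem.Chars.isIn "<= 21".toList text || PySem.Chars.isIn "< 21".toList text then score + 10
          else if PySem.Chars.isIn "18-65".toList text || PySem.Chars.isIn "18 to 65".toList text then score + 5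
          else score
        else score
      -- BMI restrictions
      let score :=
        if PySem.Chars.isIn "bmi".toList text then
          if PySem.Chars.isIn ">= 30".toList text || PySem.Chars.isIn "> 30".toList text then score + 10
          else if PySem.Chars.isIn "<= 25".toList text || PySem.Chars.isIn "< 25".toList text then score + 10
          else if PySem.Chars.isIn "bmi".toList text then score + 5
          else score
        else score
      -- Disease severity
      let score :=
        if ["severe".toList, "moderate to severe".toList, "active disease".toList].any (fun w => PySem.Chars.isIn w text) then score + 15
        else if PySem.Chars.isIn "moderate".toList text then score + 10
        else if PySem.Chars.isIn "mild".toList text then score + 5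
        else score
      -- Lab values
      let score :=
        if ["hba1c".toList, "hemoglobin".toList, "egfr".toList, "alt".toList, "ast".toList].any (fun w => PySem.Chars.isIn w text) then score + 10
        else score
      -- Documented diagnosis requirement
      let score :=
        if ["diagnosed".toList, "documented".toList, "confirmed".toList].any (fun w => PySem.Chars.isIn w text) then score + 5
        else score
      score
    else if criterion_type == "exclusion" then
      let score := score + 5
      -- Common comorbidities
      let score :=
        if ["diabetes".toList, "hypertension".toList, "cardiovascular".toList, "cancer".toList].any (fun w => PySem.Chars.isIn w text) then score + 15
        else score
      -- Medications
      let score :=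
        if ["medication".toList, "drug".toList, "treatment".toList, "therapy".toList].any (fun w => PySem.Chars.isIn w text) then score + 10
        else score
      -- Pregnancy/reproductive
      let score :=
        if ["pregnant".toList, "pregnancy".toList, "breastfeeding".toList, "childbearing".toList].any (fun w => PySem.Chars.isIn w text) then score + 5
        else score
      -- Substance use
      let score :=
        if ["alcohol".toList, "drug abuse".toList, "smoking".toList].any (fun w => PySem.Chars.isIn w text) then score + 5
        else score
      score
    else score
  max 0 (min 100 score)

-- ===== PORT B =====
-- The ordered rules table (Source B's RULES), groups as (guard, [(keyword, points)…]).
def pvInclGroups : List (List Char × List (List Char × Int)) :=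
  [("age".toList, [(">= 65".toList, 15), ("> 65".toList, 15), ("65+".toList, 15),
                   ("<= 21".toList, 10), ("< 21".toList, 10),
                   ("18-65".toList, 5), ("18 to 65".toList, 5)]),
   ("bmi".toList, [(">= 30".toList, 10), ("> 30".toList, 10),
                   ("<= 25".toList, 10), ("< 25".toList, 10),
                   ("bmi".toList, 5)]),
   ([], [("severe".toList, 15), ("moderate to severe".toList, 15), ("active disease".toList, 15),
         ("moderate".toList, 10), ("mild".toList, 5)]),
   ([], [("hba1c".toList, 10), ("hemoglobin".toList, 10), ("egfr".toList, 10), ("alt".toList, 10), ("ast".toList, 10)]),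
   ([], [("diagnosed".toList, 5), ("documented".toList, 5), ("confirmed".toList, 5)])]

def pvExclGroups : List (List Char × List (List Char × Int)) :=
  [([], [("diabetes".toList, 15), ("hypertension".toList, 15), ("cardiovascular".toList, 15), ("cancer".toList, 15)]),
   ([], [("medication".toList, 10), ("drug".toList, 10), ("treatment".toList, 10), ("therapy".toList, 10)]),
   ([], [("pregnant".toList, 5), ("pregnancy".toList, 5), ("breastfeeding".toList, 5), ("childbearing".toList, 5)]),
   ([], [("alcohol".toList, 5), ("drug abuse".toList, 5), ("smoking".toList, 5)])]

def pvRules : PySem.Dict String (Int × List (List Char × List (List Char × Int))) :=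
  PySem.Dict.ofList [("inclusion", (50, pvInclGroups)), ("exclusion", (55, pvExclGroups))]

-- Source B's _group_points inner loop: points of the first matching rule (0 if none).
def pvFirstPts (text : List Char) : List (List Char × Int) → Int
  | [] => 0
  | (kw, pts) :: rest => if PySem.Chars.isIn kw text then pts else pvFirstPts text rest

def pvGroupPoints (text : List Char) (guard : List Char) (rules : List (List Char × Int)) : Int :=
  if PySem.Chars.isIn guard text then pvFirstPts text rules else 0

def calculate_restrictiveness_score_alt (criterion_text : String) (criterion_type : String) : Int :=
  let text : List Char := PySem.Chars.lower criterion_text.toList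
  let bg := pvRules.getD criterion_type (50, [])
  let score := bg.1 + (bg.2.map (fun g => pvGroupPoints text g.1 g.2)).sum
  max 0 (min 100 score)

-- ===== PRECONDITION & SPEC =====
def Spec_calculate_restrictiveness_score (criterion_text : String) (criterion_type : String) (out : Int) : Prop := out = calculate_restrictiveness_score_alt criterion_text criterion_type
instance (criterion_text : String) (criterion_type : String) (out : Int) : Decidable (Spec_calculate_restrictiveness_score criterion_text criterion_type out) := by unfold Spec_calculate_restrictiveness_score; infer_instance

-- ===== CLAIM (what is proved, stated in full; the proofs are below) =====
def Claim_equal_calculate_restrictiveness_score : Prop := ∀ (criterion_text : String) (criterion_type : String), Dom_calculate_restrictiveness_score criterion_text criterion_type → Spec_calculate_restrictiveness_score criterion_text criterion_type (calculate_restrictiveness_score criterion_text criterion_type)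

-- ===== LEMMAS AND PROOFS =====
lemma pv_isIn_nil (l : List Char) : PySem.Chars.isIn [] l = true := by
  simp

-- each group's if/elif chain shifts the running score by exactly that group's table points
lemma pv_shift_age (l : List Char) (s : Int) :
    (if PySem.Chars.isIn "age".toList l then
       if PySem.Chars.isIn ">= 65".toList l || PySem.Chars.isIn "> 65".toList l || PySem.Chars.isIn "65+".toList l then s + 15
       else if PySem.Chars.isIn "<= 21".toList l || PySem.Chars.isIn "< 21".toList l then s + 10
       else if PySem.Chars.isIn "18-65".toList l || PySem.Chars.isIn "18 to 65".toList l then s + 5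
       else s
     else s)
    = s + pvGroupPoints l "age".toList
        [(">= 65".toList, 15), ("> 65".toList, 15), ("65+".toList, 15),
         ("<= 21".toList, 10), ("< 21".toList, 10),
         ("18-65".toList, 5), ("18 to 65".toList, 5)] := by
  simp only [pvGroupPoints, pvFirstPts]
  split_ifs <;> simp_all

lemma pv_shift_bmi (l : List Char) (s : Int) :
    (if PySem.Chars.isIn "bmi".toList l then
       if PySem.Chars.isIn ">= 30".toList l || PySem.Chars.isIn "> 30".toList l then s + 10
       else if PySem.Chars.isIn "<= 25".toList l || PySem.Chars.isIn "< 25".toList l then s + 10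
       else if PySem.Chars.isIn "bmi".toList l then s + 5
       else s
     else s)
    = s + pvGroupPoints l "bmi".toList
        [(">= 30".toList, 10), ("> 30".toList, 10),
         ("<= 25".toList, 10), ("< 25".toList, 10), ("bmi".toList, 5)] := by
  simp only [pvGroupPoints, pvFirstPts]
  split_ifs <;> simp_all

lemma pv_shift_sev (l : List Char) (s : Int) :
    (if ["severe".toList, "moderate to severe".toList, "active disease".toList].any (fun w => PySem.Chars.isIn w l) then s + 15
     else if PySem.Chars.isIn "moderate".toList l then s + 10
     else if PySem.Chars.isIn "mild".toList l then s + 5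
     else s)
    = s + pvGroupPoints l []
        [("severe".toList, 15), ("moderate to severe".toList, 15), ("active disease".toList, 15),
         ("moderate".toList, 10), ("mild".toList, 5)] := by
  simp only [pvGroupPoints, pvFirstPts, pv_isIn_nil, if_pos, List.any_cons, List.any_nil, Bool.or_false]
  split_ifs <;> simp_all

lemma pv_shift_any (l : List Char) (s : Int) (ws : List (List Char)) (rules : List (List Char × Int)) (p : Int)
    (h : rules = ws.map (fun w => (w, p))) :
    (if ws.any (fun w => PySem.Chars.isIn w l) then s + p else s)
    = s + pvGroupPoints l [] rules := by
  subst h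
  simp only [pvGroupPoints, pv_isIn_nil, if_pos]
  induction ws with
  | nil => simp [pvFirstPts]
  | cons w ws ih =>
    simp only [List.map_cons, pvFirstPts, List.any_cons]
    by_cases hw : PySem.Chars.isIn w l = true
    · simp [hw]
    · rw [Bool.not_eq_true] at hw
      simp only [hw, Bool.false_or, ih, if_neg, Bool.false_eq_true, not_false_eq_true]

lemma pv_rules_incl : pvRules.getD "inclusion" (50, []) = (50, pvInclGroups) := by decide
lemma pv_rules_excl' : pvRules.getD "exclusion" (50, []) = (55, pvExclGroups) := by decide

lemma pv_rules_other (t : String) (h1 : ¬ t = "inclusion") (h2 : ¬ t = "exclusion") :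
    pvRules.getD t (50, []) = (50, []) := by
  have hmk : pvRules = PySem.Dict.mk [("inclusion", (50, pvInclGroups)), ("exclusion", (55, pvExclGroups))] := by rfl
  rw [hmk, PySem.Dict.getD_eq_get?_getD, PySem.Dict.get?_mk_cons, PySem.Dict.get?_mk_cons]
  simp [show ("inclusion" == t) = false by simpa using fun h => h1 h.symm,
        show ("exclusion" == t) = false by simpa using fun h => h2 h.symm, PySem.Dict.get?]

-- ===== VERDICT (by name: the statement is the Claim_ definition above) =====
theorem calculate_restrictiveness_score_spec : Claim_equal_calculate_restrictiveness_score := by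
  intro ct ty _
  unfold Spec_calculate_restrictiveness_score
  unfold calculate_restrictiveness_score calculate_restrictiveness_score_alt
  set l := PySem.Chars.lower ct.toList with hl
  by_cases h1 : ty = "inclusion"
  · subst h1
    rw [pv_rules_incl]
    simp only [beq_self_eq_true, if_pos, pvInclGroups, List.map_cons, List.map_nil,
      List.sum_cons, List.sum_nil]
    rw [pv_shift_age, pv_shift_bmi, pv_shift_sev,
      pv_shift_any l _ ["hba1c".toList, "hemoglobin".toList, "egfr".toList, "alt".toList, "ast".toList] _ 10 rfl,
      pv_shift_any _ _ ["diagnosed".toList, "documented".toList, "confirmed".toList] _ 5 rfl]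
    simp only [List.map_cons, List.map_nil]
    congr 2
    ring
  · by_cases h2 : ty = "exclusion"
    · subst h2
      rw [pv_rules_excl']
      simp only [show ("exclusion" == "inclusion") = false by decide, Bool.false_eq_true,
        if_false, beq_self_eq_true, if_pos, pvExclGroups, List.map_cons, List.map_nil,
        List.sum_cons, List.sum_nil]
      rw [pv_shift_any l _ ["diabetes".toList, "hypertension".toList, "cardiovascular".toList, "cancer".toList] _ 15 rfl,
        pv_shift_any l _ ["medication".toList, "drug".toList, "treatment".toList, "therapy".toList] _ 10 rfl,
        pv_shift_any l _ ["pregnant".toList, "pregnancy".toList, "breastfeeding".toList, "childbearing".toList] _ 5 rfl,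
        pv_shift_any l _ ["alcohol".toList, "drug abuse".toList, "smoking".toList] _ 5 rfl]
      simp only [List.map_cons, List.map_nil]
      congr 2
      ring
    · rw [pv_rules_other ty h1 h2]
      simp [show (ty == "inclusion") = false by simpa using h1,
        show (ty == "exclusion") = false by simpa using h2]
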